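-- pv_equiv track=rewrite | github.com/AM1608/DRONE-PROGRAM | a1.py | findPositionandDistance
-- ===== SOURCE A (Python) =====
-- class arraystack:
--     def __init__(self):
--         self._data=[]
--     def len(self):
--         return len(self._data)
--     def isempty(self):
--         return len(self._data)==0
--     def push(self,e):
--         self._data.append(e)
--     def top(self):
--         if self.isempty():
--             raise Empty('stack is empty')
--         return self._data[-1]
--     def pop(self):
--         if self.isempty():
--             raise Empty('stack is empty')
--         return self._data.pop()
--     def __str__(self):
--         return ''.join(str(self._data))+'>'
--
-- def findPositionandDistance(P):#p is a string
--     s=arraystack() # this stack is used to store variables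
--     s_2=arraystack() # this stack is used to store int value once one open braket start
--     a=0
--     ct=0 # varible use to count braket
--     d=0 # used to store value of int after open braket start
--     for i in range(len(P)): # travelling string
--         if(P[i].isdigit()): # to find is str is a digit or not
--             if(ct==0): # this mean we havnt pass any open braket or pass open braket but also pass close braket
--                 c=str(a)+P[i] # this is for...if int is more then one digit
--                 a=int(c)
--             elif(ct!=0): # if we pass any open braket
--                 if d!=0:
--                     a=a//d
--                 d=int(str(d)+(P[i])) #to store number after passing one open braket
--                 if(s_2.isempty()!=True): # if our stack_2 is not empty then
--                     s_2.pop() #then pop first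
--                 s_2.push(d) # append new d
--                 a=(d*a) # update a
--         elif(P[i]=="("): #if we cross an open braket then ct+1 and update d
--             ct=ct+1
--             d=0
--         elif(P[i]==")"):#if we cross a close braket then ct-1 and update d
--             d=0
--             ct=ct-1
--             if( s_2.isempty()==False):
--                 if (s_2.top()!=0):
--                     a=a//s_2.top() # update a
--                     s_2.pop()
--             if(ct==0):# if all braket (open and close ) are equal then update a=0
--                 a=0
--         elif(P[i]=="+" or P[i]=="-"): # if we find + or - then store the varible in a stack with corresponding a
--             if(a==0): # if a=0 then treat a=1
--                 s.push(P[i+1]) # first push varible then 'a' then + or - sign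
--                 s.push(1)
--                 s.push(P[i])
--             else:
--                 s.push(P[i+1])
--                 s.push((a))
--                 s.push(P[i])
--     a=0 # varible num to store x displacement
--     b=0 # varible num to store y displacement
--     c=0 #varible num to store z displacement
--     d=0 #varible num to store distance travl
--     while not(s.isempty()): # secound loop for stack 1 we have made to simplify it
--         if s.top()=="+": # if we got + sign then we have to add then check the varible corresponding to that varible
--             s.pop() # pop the sign
--             f=s.top() # assing f as the int val
--             d=d+f # add it to dis
--             s.pop() # again pop (pop the int val)
--             if s.top()=="X": # then check is there sign X or Y or Z correspond to that add num in there corresponding varible assing above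
--                 s.pop()
--                 a=a+f
--             elif s.top()=="Y":
--                 s.pop()
--                 b=b+f
--             elif s.top()=="Z":
--                 s.pop()
--                 c=c+f
--         elif s.top()=="-": # lly case as above but little diff that instead of adding just sub. it
--             s.pop()
--             f=s.top()
--             d=d+f
--             s.pop()
--             if s.top()=="X":
--                 s.pop()
--                 a=a-f
--             elif s.top()=="Y":
--                 s.pop()
--                 b=b-f
--             elif s.top()=="Z":
--                 s.pop()
--                 c=c-f
--
--     return [a,b,c,d]
-- ===== SOURCE B (Python) =====
-- def findPositionandDistance(P):
--     # Single forward pass: accumulate x/y/z/distance directly at each sign,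
--     # instead of pushing triples on a stack and unwinding it in a second loop.
--     # The one-element s_2 stack of the original becomes the scalar `last`.
--     x = y = z = dist = 0
--     a = 0
--     ct = 0
--     d = 0
--     last = None
--     for i, ch in enumerate(P):
--         if ch.isdigit():
--             if ct == 0:
--                 a = int(str(a) + ch)
--             else:
--                 if d != 0:
--                     a = a // d
--                 d = int(str(d) + ch)
--                 last = d
--                 a = d * a
--         elif ch == "(":
--             ct += 1
--             d = 0
--         elif ch == ")":
--             d = 0
--             ct -= 1
--             if last is not None and last != 0:
--                 a = a // last
--                 last = None
--             if ct == 0: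
--                 a = 0
--         elif ch == "+" or ch == "-":
--             ax = P[i + 1]  # same IndexError as the original on a trailing sign
--             f = 1 if a == 0 else a
--             dist += f
--             sgn = 1 if ch == "+" else -1
--             if ax == "X":
--                 x += sgn * f
--             elif ax == "Y":
--                 y += sgn * f
--             elif ax == "Z":
--                 z += sgn * f
--     return [x, y, z, dist]
-- ===== Notes on version B (the rewrite author's own statement) =====
-- stated objective: simpler
-- what changed: B folds A's second stack-unwinding loop into the single forward parsing pass (each sign contributes to independent x/y/z/distance accumulators, so LIFO order is irrelevant) and replaces the one-element s_2 stack with an optional scalar; the variable stack s disappears entirely, which also makes B measurably faster by a constant factor (one pass, no stack allocation).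
-- outside the precondition, e.g. on findPositionandDistance('+'): A raises IndexError, B raises IndexError; on findPositionandDistance('+a'): A does not finish within the time limit, B returns [0, 0, 0, 1]; on findPositionandDistance('-'): A raises IndexError, B raises IndexError
import Mathlib
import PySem

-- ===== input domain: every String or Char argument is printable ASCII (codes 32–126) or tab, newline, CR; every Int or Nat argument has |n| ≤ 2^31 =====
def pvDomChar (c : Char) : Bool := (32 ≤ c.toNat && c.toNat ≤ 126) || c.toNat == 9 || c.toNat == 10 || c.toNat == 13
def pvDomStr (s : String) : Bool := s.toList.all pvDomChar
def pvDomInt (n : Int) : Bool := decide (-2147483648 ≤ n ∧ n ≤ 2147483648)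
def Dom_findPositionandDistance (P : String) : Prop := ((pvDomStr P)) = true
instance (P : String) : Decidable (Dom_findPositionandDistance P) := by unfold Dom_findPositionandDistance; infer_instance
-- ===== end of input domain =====

-- B replaces A's stack-and-second-unwinding-loop with a single forward pass of
-- scalar accumulators (objective: simpler); equal return values on Pre_.

-- int(str(a) + ch): always parses (str(a) ++ a digit is a valid int literal), getD never fires
def pvIntCat (a : Int) (c : Char) : Int :=
  (PySem.Int.ofStr? (PySem.Int.toStr a ++ c.toString)).getD 0

-- ===== PORT A =====
-- stack elements of A's `s`: Python pushes chars and ints on the same stack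
inductive PElem : Type
  | ch : Char → PElem
  | num : Int → PElem
deriving DecidableEq, Repr

-- A's first loop: builds the stack `s` (head = top); the lookahead P[i+1] of the
-- sign branch is the head of the remaining characters. s2 models the stack s_2.
def pvParseA : List Char → List PElem → List Int → Int → Int → Int → List PElem
  | [], s, _, _, _, _ => s
  | c :: rest, s, s2, a, ct, d =>
    if PySem.Chars.isdigit c then
      if ct = 0 then pvParseA rest s s2 (pvIntCat a c) ct d
      else
        let a1 := if d ≠ 0 then PySem.Int.floordiv a d else a
        let d1 := pvIntCat d c
        let s2' := d1 :: (if s2 = [] then s2 else s2.tail)  -- pop (if nonempty) then push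
        pvParseA rest s s2' (d1 * a1) ct d1
    else if c = '(' then pvParseA rest s s2 a (ct + 1) 0
    else if c = ')' then
      let p : Int × List Int :=
        match s2 with
        | t :: r => if t ≠ 0 then (PySem.Int.floordiv a t, r) else (a, t :: r)
        | [] => (a, [])
      pvParseA rest s p.2 (if ct - 1 = 0 then 0 else p.1) (ct - 1) 0
    else if c = '+' ∨ c = '-' then
      match rest.head? with
      | none => s  -- Python raises IndexError here (excluded by Pre_)
      | some nx =>
        let f := if a = 0 then (1 : Int) else a
        pvParseA rest (PElem.ch c :: PElem.num f :: PElem.ch nx :: s) s2 a ct d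
    else pvParseA rest s s2 a ct d

-- A's second loop, unwinding the stack; where Python would raise Empty/TypeError or
-- loop forever (top not a sign, or a malformed triple — unreachable under Pre_) it stops.
def pvUnwindA : List PElem → Int × Int × Int × Int → Int × Int × Int × Int
  | [], acc => acc
  | PElem.ch sg :: rest, (x, y, z, dd) =>
    if sg = '+' then
      match rest with
      | PElem.num f :: PElem.ch ax :: r =>
        if ax = 'X' then pvUnwindA r (x + f, y, z, dd + f)
        else if ax = 'Y' then pvUnwindA r (x, y + f, z, dd + f)
        else if ax = 'Z' then pvUnwindA r (x, y, z + f, dd + f)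
        else (x, y, z, dd + f)  -- Python loops forever (outside Pre_)
      | _ => (x, y, z, dd)      -- Python raises / loops (outside Pre_)
    else if sg = '-' then
      match rest with
      | PElem.num f :: PElem.ch ax :: r =>
        if ax = 'X' then pvUnwindA r (x - f, y, z, dd + f)
        else if ax = 'Y' then pvUnwindA r (x, y - f, z, dd + f)
        else if ax = 'Z' then pvUnwindA r (x, y, z - f, dd + f)
        else (x, y, z, dd + f)  -- Python loops forever (outside Pre_)
      | _ => (x, y, z, dd)      -- Python raises / loops (outside Pre_)
    else (x, y, z, dd)          -- top not a sign: Python loops forever (outside Pre_)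
  | PElem.num _ :: _, acc => acc  -- top not a sign: Python loops forever (outside Pre_)

def findPositionandDistance (P : String) : List Int :=
  match pvUnwindA (pvParseA P.toList [] [] 0 0 0) (0, 0, 0, 0) with
  | (x, y, z, dd) => [x, y, z, dd]

-- ===== PORT B =====
-- B's single pass: same parse state (a, ct, d, last) plus direct accumulators.
def pvRunB : List Char → Int → Int → Int → Int → Int → Int → Int → Option Int →
    Int × Int × Int × Int
  | [], x, y, z, dist, _, _, _, _ => (x, y, z, dist)
  | c :: rest, x, y, z, dist, a, ct, d, last =>
    if PySem.Chars.isdigit c then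
      if ct = 0 then pvRunB rest x y z dist (pvIntCat a c) ct d last
      else
        let a1 := if d ≠ 0 then PySem.Int.floordiv a d else a
        let d1 := pvIntCat d c
        pvRunB rest x y z dist (d1 * a1) ct d1 (some d1)
    else if c = '(' then pvRunB rest x y z dist a (ct + 1) 0 last
    else if c = ')' then
      let p : Int × Option Int :=
        match last with
        | some t => if t ≠ 0 then (PySem.Int.floordiv a t, none) else (a, some t)
        | none => (a, none)
      pvRunB rest x y z dist (if ct - 1 = 0 then 0 else p.1) (ct - 1) 0 p.2
    else if c = '+' ∨ c = '-' then
      match rest.head? with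
      | none => (x, y, z, dist)  -- Python raises IndexError here (excluded by Pre_)
      | some ax =>
        let f := if a = 0 then (1 : Int) else a
        let sgn : Int := if c = '+' then 1 else -1
        pvRunB rest
          (if ax = 'X' then x + sgn * f else x)
          (if ax = 'Y' then y + sgn * f else y)
          (if ax = 'Z' then z + sgn * f else z)
          (dist + f) a ct d last
    else pvRunB rest x y z dist a ct d last

def findPositionandDistance_alt (P : String) : List Int :=
  match pvRunB P.toList 0 0 0 0 0 0 0 none with
  | (x, y, z, dd) => [x, y, z, dd]

-- ===== PRECONDITION & SPEC =====
-- every '+'/'-' must be followed by 'X', 'Y' or 'Z'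
def pvSignsOk : List Char → Bool
  | [] => true
  | c :: rest =>
    ((!(c == '+' || c == '-')) ||
      (match rest with
       | nx :: _ => nx == 'X' || nx == 'Y' || nx == 'Z'
       | [] => false)) && pvSignsOk rest

-- Pre_ excludes exactly the inputs on which A does not return: a trailing '+'/'-'
-- (IndexError) and a '+'/'-' followed by a non-axis character (A's second loop
-- then never pops that element and loops forever).
def Pre_findPositionandDistance (P : String) : Prop := pvSignsOk P.toList = true
instance (P : String) : Decidable (Pre_findPositionandDistance P) := by
  unfold Pre_findPositionandDistance; infer_instance

def pvWitness_findPositionandDistance : String := "2+X(3+Y)"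

def Spec_findPositionandDistance (P : String) (out : List Int) : Prop :=
  out = findPositionandDistance_alt P
instance (P : String) (out : List Int) : Decidable (Spec_findPositionandDistance P out) := by
  unfold Spec_findPositionandDistance; infer_instance

-- ===== CLAIM (what is proved, stated in full; the proofs are below) =====
def Claim_equal_findPositionandDistance : Prop :=
  ∀ (P : String), Dom_findPositionandDistance P → Pre_findPositionandDistance P →
    Spec_findPositionandDistance P (findPositionandDistance P)

-- ===== LEMMAS AND PROOFS =====

-- well-formed stacks: concatenations of triples (sign, value, axis)
inductive pvWF : List PElem → Prop
  | nil : pvWF []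
  | cons (sg ax : Char) (f : Int) (r : List PElem) :
      (sg = '+' ∨ sg = '-') → (ax = 'X' ∨ ax = 'Y' ∨ ax = 'Z') → pvWF r →
      pvWF (PElem.ch sg :: PElem.num f :: PElem.ch ax :: r)

def pvContrib (sg ax : Char) (f : Int) : Int × Int × Int × Int :=
  (if ax = 'X' then (if sg = '+' then f else -f) else 0,
   if ax = 'Y' then (if sg = '+' then f else -f) else 0,
   if ax = 'Z' then (if sg = '+' then f else -f) else 0,
   f)

lemma pvUnwindA_step (sg ax : Char) (f : Int) (r : List PElem) (x y z dd : Int)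
    (hs : sg = '+' ∨ sg = '-') (ha : ax = 'X' ∨ ax = 'Y' ∨ ax = 'Z') :
    pvUnwindA (PElem.ch sg :: PElem.num f :: PElem.ch ax :: r) (x, y, z, dd) =
      pvUnwindA r (x + (pvContrib sg ax f).1, y + (pvContrib sg ax f).2.1,
        z + (pvContrib sg ax f).2.2.1, dd + f) := by
  rcases hs with rfl | rfl <;> rcases ha with rfl | rfl | rfl <;>
    simp [pvUnwindA, pvContrib] <;> ring_nf

lemma pvUnwindA_append (l m : List PElem) (acc : Int × Int × Int × Int) (hl : pvWF l) :
    pvUnwindA (l ++ m) acc = pvUnwindA m (pvUnwindA l acc) := by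
  induction hl generalizing acc with
  | nil => simp [pvUnwindA]
  | cons sg ax f r hs ha hr ih =>
    obtain ⟨x, y, z, dd⟩ := acc
    rw [List.cons_append, List.cons_append, List.cons_append,
      pvUnwindA_step sg ax f (r ++ m) x y z dd hs ha,
      pvUnwindA_step sg ax f r x y z dd hs ha, ih]

lemma pvUnwindA_shift (l : List PElem) (hl : pvWF l) (x y z dd p q r s : Int) :
    pvUnwindA l (x + p, y + q, z + r, dd + s) =
      ((pvUnwindA l (x, y, z, dd)).1 + p, (pvUnwindA l (x, y, z, dd)).2.1 + q,
       (pvUnwindA l (x, y, z, dd)).2.2.1 + r, (pvUnwindA l (x, y, z, dd)).2.2.2 + s) := by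
  induction hl generalizing x y z dd with
  | nil => simp [pvUnwindA]
  | cons sg ax f t hs ha ht ih =>
    rw [pvUnwindA_step sg ax f t (x + p) (y + q) (z + r) (dd + s) hs ha,
      pvUnwindA_step sg ax f t x y z dd hs ha]
    have e1 : x + p + (pvContrib sg ax f).1 = x + (pvContrib sg ax f).1 + p := by ring
    have e2 : y + q + (pvContrib sg ax f).2.1 = y + (pvContrib sg ax f).2.1 + q := by ring
    have e3 : z + r + (pvContrib sg ax f).2.2.1 = z + (pvContrib sg ax f).2.2.1 + r := by ring
    have e4 : dd + s + f = dd + f + s := by ring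
    rw [e1, e2, e3, e4, ih]

lemma pvUnwindA_triple (sg ax : Char) (f : Int) (u : Int × Int × Int × Int)
    (hs : sg = '+' ∨ sg = '-') (ha : ax = 'X' ∨ ax = 'Y' ∨ ax = 'Z') :
    pvUnwindA [PElem.ch sg, PElem.num f, PElem.ch ax] u =
      (u.1 + (pvContrib sg ax f).1, u.2.1 + (pvContrib sg ax f).2.1,
       u.2.2.1 + (pvContrib sg ax f).2.2.1, u.2.2.2 + f) := by
  obtain ⟨x, y, z, dd⟩ := u
  rw [show [PElem.ch sg, PElem.num f, PElem.ch ax] =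
      PElem.ch sg :: PElem.num f :: PElem.ch ax :: [] from rfl,
    pvUnwindA_step sg ax f [] x y z dd hs ha]
  rfl

lemma pvSignsOk_tail {c : Char} {rest : List Char} (h : pvSignsOk (c :: rest) = true) :
    pvSignsOk rest = true := by
  simp [pvSignsOk, Bool.and_eq_true] at h; exact h.2

lemma pvSignsOk_head {c nx : Char} {rest : List Char}
    (h : pvSignsOk (c :: nx :: rest) = true) (hc : c = '+' ∨ c = '-') :
    nx = 'X' ∨ nx = 'Y' ∨ nx = 'Z' := by
  rw [pvSignsOk] at h
  rcases hc with rfl | rfl <;> simp at h <;> tauto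

lemma pvSignsOk_sign {c : Char} {rest : List Char}
    (h : pvSignsOk (c :: rest) = true) (hc : c = '+' ∨ c = '-') :
    ∃ nx, rest.head? = some nx ∧ (nx = 'X' ∨ nx = 'Y' ∨ nx = 'Z') := by
  cases rest with
  | nil => exfalso; rcases hc with rfl | rfl <;> simp [pvSignsOk] at h
  | cons nx r => exact ⟨nx, rfl, pvSignsOk_head h hc⟩

lemma pvParseA_append (cs : List Char) (s : List PElem) (s2 : List Int) (a ct d : Int) :
    pvParseA cs s s2 a ct d = pvParseA cs [] s2 a ct d ++ s := by
  induction cs generalizing s s2 a ct d with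
  | nil => simp [pvParseA]
  | cons c rest ih =>
    by_cases hd : PySem.Chars.isdigit c
    · by_cases hc : ct = 0
      · simp only [pvParseA, hd, if_true, hc]; exact ih ..
      · simp only [pvParseA, hd, if_true, if_neg hc]; exact ih ..
    · by_cases ho : c = '('
      · simp only [pvParseA, ho, if_true]; exact ih ..
      · by_cases hcl : c = ')'
        · simp only [pvParseA, hcl, if_true]; exact ih ..
        · by_cases hpm : c = '+' ∨ c = '-'
          · simp only [pvParseA, hd, if_neg ho, if_neg hcl, hpm, if_true]
            cases rest with
            | nil => simp
            | cons nx rest' =>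
              simp only [List.head?_cons]
              rw [ih (PElem.ch c :: PElem.num (if a = 0 then 1 else a) :: PElem.ch nx :: s),
                ih (PElem.ch c :: PElem.num (if a = 0 then 1 else a) :: PElem.ch nx :: [])]
              simp
          · simp only [pvParseA, hd, if_neg ho, if_neg hcl, if_neg hpm]; exact ih ..

lemma pvWF_parseA (cs : List Char) (s : List PElem) (s2 : List Int) (a ct d : Int)
    (hok : pvSignsOk cs = true) (hs : pvWF s) : pvWF (pvParseA cs s s2 a ct d) := by
  induction cs generalizing s s2 a ct d with
  | nil => simpa [pvParseA] using hs
  | cons c rest ih =>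
    have hrest := pvSignsOk_tail hok
    by_cases hd : PySem.Chars.isdigit c
    · by_cases hc : ct = 0
      · simp only [pvParseA, hd, if_true, hc]; exact ih _ _ _ _ _ hrest hs
      · simp only [pvParseA, hd, if_true, if_neg hc]; exact ih _ _ _ _ _ hrest hs
    · by_cases ho : c = '('
      · simp only [pvParseA, ho, if_true]; exact ih _ _ _ _ _ hrest hs
      · by_cases hcl : c = ')'
        · simp only [pvParseA, hcl, if_true]
          exact ih _ _ _ _ _ hrest hs
        · by_cases hpm : c = '+' ∨ c = '-'
          · simp only [pvParseA, hd, if_neg ho, if_neg hcl, hpm, if_true]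
            cases rest with
            | nil => simpa using hs
            | cons nx rest' =>
              simp only [List.head?_cons]
              exact ih _ _ _ _ _ hrest (pvWF.cons c nx _ s hpm (pvSignsOk_head hok hpm) hs)
          · simp only [pvParseA, hd, if_neg ho, if_neg hcl, if_neg hpm]
            exact ih _ _ _ _ _ hrest hs

-- the main invariant: B's forward accumulation equals A's parse-then-unwind
lemma pvMain (cs : List Char) (a ct d : Int) (last : Option Int) (x y z dist : Int)
    (hok : pvSignsOk cs = true) :
    pvRunB cs x y z dist a ct d last =
      pvUnwindA (pvParseA cs [] last.toList a ct d) (x, y, z, dist) := by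
  induction cs generalizing a ct d last x y z dist with
  | nil => simp [pvRunB, pvParseA, pvUnwindA]
  | cons c rest ih =>
    have hrest := pvSignsOk_tail hok
    by_cases hd : PySem.Chars.isdigit c
    · by_cases hc : ct = 0
      · simp only [pvRunB, pvParseA, hd, if_true, hc]; exact ih _ _ _ _ _ _ _ _ hrest
      · simp only [pvRunB, pvParseA, hd, if_true, if_neg hc]
        have : pvIntCat d c :: (if (last.toList : List Int) = [] then last.toList else last.toList.tail)
            = (some (pvIntCat d c) : Option Int).toList := by cases last <;> simp
        rw [this]; exact ih _ _ _ _ _ _ _ _ hrest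
    · by_cases ho : c = '('
      · simp only [pvRunB, pvParseA, ho, if_true]; exact ih _ _ _ _ _ _ _ _ hrest
      · by_cases hcl : c = ')'
        · simp only [pvRunB, pvParseA, hcl, if_true]
          cases last with
          | none => simpa using ih _ _ _ _ _ _ _ _ hrest
          | some t =>
            by_cases ht : t = 0
            · subst ht; simpa using ih _ _ _ _ _ _ _ _ hrest
            · simp only [Option.toList]
              simpa [ht] using ih _ _ _ _ _ _ _ _ hrest
        · by_cases hpm : c = '+' ∨ c = '-'
          · obtain ⟨nx, hhead, hax⟩ := pvSignsOk_sign hok hpm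
            have hWF : pvWF (pvParseA rest [] last.toList a ct d) :=
              pvWF_parseA _ _ _ _ _ _ hrest pvWF.nil
            have hstepB : pvRunB (c :: rest) x y z dist a ct d last =
                pvRunB rest
                  (if nx = 'X' then x + (if c = '+' then 1 else -1) * (if a = 0 then 1 else a) else x)
                  (if nx = 'Y' then y + (if c = '+' then 1 else -1) * (if a = 0 then 1 else a) else y)
                  (if nx = 'Z' then z + (if c = '+' then 1 else -1) * (if a = 0 then 1 else a) else z)
                  (dist + (if a = 0 then 1 else a)) a ct d last := by
              simp only [pvRunB, hhead, if_pos hpm, if_neg hd, if_neg ho, if_neg hcl]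
            have hstepA : pvParseA (c :: rest) [] last.toList a ct d =
                pvParseA rest
                  [PElem.ch c, PElem.num (if a = 0 then 1 else a), PElem.ch nx]
                  last.toList a ct d := by
              simp only [pvParseA, hhead, if_pos hpm, if_neg hd, if_neg ho, if_neg hcl]
            have hcon : (if nx = 'X' then x + (if c = '+' then 1 else -1) * (if a = 0 then 1 else a) else x)
                  = x + (pvContrib c nx (if a = 0 then 1 else a)).1 ∧
                (if nx = 'Y' then y + (if c = '+' then 1 else -1) * (if a = 0 then 1 else a) else y)
                  = y + (pvContrib c nx (if a = 0 then 1 else a)).2.1 ∧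
                (if nx = 'Z' then z + (if c = '+' then 1 else -1) * (if a = 0 then 1 else a) else z)
                  = z + (pvContrib c nx (if a = 0 then 1 else a)).2.2.1 := by
              rcases hpm with rfl | rfl <;> rcases hax with rfl | rfl | rfl <;>
                simp [pvContrib] <;> split_ifs <;> ring
            rw [hstepB, hstepA,
              pvParseA_append rest [PElem.ch c, PElem.num (if a = 0 then 1 else a), PElem.ch nx]
                last.toList a ct d,
              pvUnwindA_append _ _ _ hWF,
              pvUnwindA_triple c nx (if a = 0 then 1 else a) _ hpm hax,
              ih _ _ _ _ _ _ _ _ hrest,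
              hcon.1, hcon.2.1, hcon.2.2,
              pvUnwindA_shift _ hWF x y z dist
                (pvContrib c nx (if a = 0 then 1 else a)).1
                (pvContrib c nx (if a = 0 then 1 else a)).2.1
                (pvContrib c nx (if a = 0 then 1 else a)).2.2.1
                (if a = 0 then 1 else a)]
          · simp only [pvRunB, pvParseA, hd, if_neg ho, if_neg hcl, if_neg hpm]
            exact ih _ _ _ _ _ _ _ _ hrest

-- ===== VERDICT (by name: the statement is the Claim_ definition above) =====
theorem findPositionandDistance_spec : Claim_equal_findPositionandDistance := by
  intro P _ hpre
  unfold Spec_findPositionandDistance findPositionandDistance findPositionandDistance_alt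
  rw [pvMain P.toList 0 0 0 none 0 0 0 0 hpre]
  rfl
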